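-- pv_equiv track=rewrite | github.com/mpearce9/3155Activities | PythonBasics2/test.py | count_threes
-- ===== SOURCE A (Python) =====
-- def count_threes(n):
--     d = dict()
--     d['3'] = 0
--     d['6'] = 0
--     d['9'] = 0
--     for i in n:
--       if i not in d:
--         d[i] = 1
--       else:
--         d[i] = d[i] + 1
--     if d['3'] > d['6'] and d['3'] > d['9']:
--         return d['3']
--     elif d['6'] > d['3'] and d['6'] > d['9']:
--         return d['6']
--     else:
--         return d['9']
-- ===== SOURCE B (Python) =====
-- def count_threes(n):
--     # sort-then-scan: group equal characters into runs and read off run lengths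
--     s = sorted(n)
--     c3 = c6 = c9 = 0
--     i, m = 0, len(s)
--     while i < m:
--         j = i + 1
--         while j < m and s[j] == s[i]:
--             j += 1
--         if s[i] == '3':
--             c3 = j - i
--         elif s[i] == '6':
--             c6 = j - i
--         elif s[i] == '9':
--             c9 = j - i
--         i = j
--     if c3 > c6 and c3 > c9:
--         return c3
--     elif c6 > c3 and c6 > c9:
--         return c6
--     else:
--         return c9
-- ===== Notes on version B (the rewrite author's own statement) =====
-- stated objective: alternative
-- what changed: Replaces the single-pass dict-counting loop with sort-then-scan: sort the characters, run-length-scan the sorted list to read off the three relevant counts, then the same strict-majority comparison.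
import Mathlib
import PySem

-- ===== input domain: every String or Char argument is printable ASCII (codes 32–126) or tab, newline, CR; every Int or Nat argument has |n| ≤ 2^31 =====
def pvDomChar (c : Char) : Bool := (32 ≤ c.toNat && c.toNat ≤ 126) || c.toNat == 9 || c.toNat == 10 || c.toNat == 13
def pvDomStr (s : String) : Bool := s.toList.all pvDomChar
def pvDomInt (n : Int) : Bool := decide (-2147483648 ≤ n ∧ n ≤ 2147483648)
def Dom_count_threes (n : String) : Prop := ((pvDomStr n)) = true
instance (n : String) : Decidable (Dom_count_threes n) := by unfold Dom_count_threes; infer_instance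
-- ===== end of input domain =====

-- B replaces A's dict-counting loop by sort-then-scan (runs of the sorted characters); alternative algorithm, same result.

-- ===== PORT A =====
def count_threes (n : String) : Int :=
  let d : PySem.Dict Char Int :=
    ((PySem.Dict.empty.insert '3' 0).insert '6' 0).insert '9' 0
  let d := n.toList.foldl (fun d i =>
    if ¬ d.contains i then d.insert i 1 else d.insert i (d.getD i 0 + 1)) d
  if d.getD '3' 0 > d.getD '6' 0 ∧ d.getD '3' 0 > d.getD '9' 0 then d.getD '3' 0
  else if d.getD '6' 0 > d.getD '3' 0 ∧ d.getD '6' 0 > d.getD '9' 0 then d.getD '6' 0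
  else d.getD '9' 0

-- ===== PORT B =====
-- the outer while loop of Source B: each step consumes one maximal run of equal characters
-- (the inner `while s[j] == s[i]` scan is the takeWhile/dropWhile split) and records its length
def pvRunsB : List Char → Int → Int → Int → Int × Int × Int
  | [], c3, c6, c9 => (c3, c6, c9)
  | x :: rest, c3, c6, c9 =>
    let run : Int := (rest.takeWhile (· == x)).length + 1
    let rest' := rest.dropWhile (· == x)
    if x = '3' then pvRunsB rest' run c6 c9
    else if x = '6' then pvRunsB rest' c3 run c9
    else if x = '9' then pvRunsB rest' c3 c6 run
    else pvRunsB rest' c3 c6 c9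
termination_by l _ _ _ => l.length
decreasing_by all_goals
  simp only [List.length_cons]
  exact Nat.lt_succ_of_le (List.length_dropWhile_le _ _)

def count_threes_alt (n : String) : Int :=
  let s := PySem.List.sorted n.toList (fun c => c) false
  let r := pvRunsB s 0 0 0
  let c3 := r.1
  let c6 := r.2.1
  let c9 := r.2.2
  if c3 > c6 ∧ c3 > c9 then c3
  else if c6 > c3 ∧ c6 > c9 then c6
  else c9

-- ===== PRECONDITION & SPEC =====
def Spec_count_threes (n : String) (out : Int) : Prop := out = count_threes_alt n
instance (n : String) (out : Int) : Decidable (Spec_count_threes n out) := by unfold Spec_count_threes; infer_instance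

-- ===== CLAIM (what is proved, stated in full; the proofs are below) =====
def Claim_equal_count_threes : Prop := ∀ (n : String), Dom_count_threes n → Spec_count_threes n (count_threes n)

-- ===== LEMMAS AND PROOFS =====

-- A's loop keeps every key already present, and its value at such a key grows by the count.
theorem loop_getD (xs : List Char) : ∀ (d : PySem.Dict Char Int) (k : Char),
    d.contains k = true →
    (xs.foldl (fun d i =>
      if ¬ d.contains i then d.insert i 1 else d.insert i (d.getD i 0 + 1)) d).getD k 0
      = d.getD k 0 + xs.count k := by
  induction xs with
  | nil => intro d k _; simp
  | cons i xs ih =>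
    intro d k hk
    simp only [List.foldl_cons, List.count_cons]
    by_cases hik : i = k
    · subst hik
      simp only [hk, not_true, if_false]
      rw [ih _ _ (by simp)]
      simp
      ring
    · have hki : k ≠ i := fun h => hik h.symm
      by_cases hc : d.contains i = true
      · simp only [hc, not_true, if_false]
        rw [ih _ _ (by simp [PySem.Dict.contains_insert, hk])]
        simp [PySem.Dict.getD_insert, hki, hik]
      · simp only [eq_false_of_ne_true hc]
        rw [ih _ _ (by simp [PySem.Dict.contains_insert, hk])]
        simp [PySem.Dict.getD_insert, hki, hik]

theorem getD_after (n : String) (k : Char) (hk : k = '3' ∨ k = '6' ∨ k = '9') :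
    ((n.toList.foldl (fun d i =>
      if ¬ d.contains i then d.insert i 1 else d.insert i (d.getD i 0 + 1))
      (((PySem.Dict.empty.insert '3' 0).insert '6' 0).insert '9' 0)).getD k 0)
      = (n.toList.count k : Int) := by
  rw [loop_getD]
  · rcases hk with h | h | h <;> subst h <;> simp [PySem.Dict.getD_insert]
  · rcases hk with h | h | h <;> subst h <;> simp [PySem.Dict.contains_insert]

-- in a sorted list whose elements are all ≥ x, dropping the leading run of x removes every x
theorem not_mem_dropWhile_of_sorted (x : Char) : ∀ (l : List Char),
    (∀ y ∈ l, x ≤ y) → l.Pairwise (· ≤ ·) → x ∉ l.dropWhile (· == x) := by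
  intro l
  induction l with
  | nil => intro _ _ h; simp at h
  | cons y t ih =>
    intro hge hp
    by_cases hxy : y = x
    · subst hxy
      rw [List.dropWhile_cons_of_pos (by simp)]
      exact ih (fun z hz => hge z (List.mem_cons_of_mem _ hz)) (List.Pairwise.of_cons hp)
    · rw [List.dropWhile_cons_of_neg (by simp [hxy])]
      intro hmem
      rcases List.mem_cons.mp hmem with h | h
      · exact hxy h.symm
      · have hxlt : x < y :=
          lt_of_le_of_ne (hge y (List.mem_cons_self ..)) (fun h => hxy h.symm)
        have : y ≤ x := (List.pairwise_cons.mp hp).1 x h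
        exact absurd (lt_of_lt_of_le hxlt this) (lt_irrefl x)

-- counts of a character other than x pass unchanged through the leading-run split
theorem count_dropWhile_ne (x c : Char) (hcx : c ≠ x) (l : List Char) :
    (l.dropWhile (· == x)).count c = l.count c := by
  conv_rhs => rw [← List.takeWhile_append_dropWhile (p := (· == x)) (l := l)]
  rw [List.count_append]
  have : (l.takeWhile (· == x)).count c = 0 := by
    rw [List.count_eq_zero]
    intro hmem
    exact hcx (by simpa using List.mem_takeWhile_imp hmem)
  omega

-- run-length scan of a sorted list yields exactly the three counts
theorem pvRunsB_eq (l : List Char) (hp : l.Pairwise (· ≤ ·)) :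
    pvRunsB l 0 0 0 = ((l.count '3' : Int), (l.count '6' : Int), (l.count '9' : Int)) := by
  suffices h : ∀ (m : ℕ) (l : List Char), l.length ≤ m → l.Pairwise (· ≤ ·) →
      ∀ (c3 c6 c9 : Int), pvRunsB l c3 c6 c9 =
        ((if '3' ∈ l then (l.count '3' : Int) else c3),
         (if '6' ∈ l then (l.count '6' : Int) else c6),
         (if '9' ∈ l then (l.count '9' : Int) else c9)) by
    rw [h l.length l le_rfl hp 0 0 0]
    by_cases h3 : '3' ∈ l <;> by_cases h6 : '6' ∈ l <;> by_cases h9 : '9' ∈ l <;>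
      simp [h3, h6, h9, List.count_eq_zero.mpr]
  intro m
  induction m with
  | zero =>
    intro l hl _ c3 c6 c9
    have : l = [] := List.length_eq_zero_iff.mp (Nat.le_zero.mp hl)
    subst this; simp [pvRunsB]
  | succ m ih =>
    intro l hl hp c3 c6 c9
    match l with
    | [] => simp [pvRunsB]
    | x :: rest =>
      have hge : ∀ y ∈ rest, x ≤ y := (List.pairwise_cons.mp hp).1
      have hprest : rest.Pairwise (· ≤ ·) := (List.pairwise_cons.mp hp).2
      have hgecons : ∀ y ∈ x :: rest, x ≤ y := by
        intro y hy; rcases List.mem_cons.mp hy with h | h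
        · exact le_of_eq h.symm
        · exact hge y h
      have hnotmem : x ∉ rest.dropWhile (· == x) :=
        not_mem_dropWhile_of_sorted x rest hge hprest
      have hlen : (rest.dropWhile (· == x)).length ≤ m := by
        have := List.length_dropWhile_le (· == x) rest
        simp only [List.length_cons] at hl; omega
      have hprest' : (rest.dropWhile (· == x)).Pairwise (· ≤ ·) :=
        hprest.sublist (List.dropWhile_sublist _)
      -- the run length is the full count of x in x :: rest
      have hcountx : ((rest.takeWhile (· == x)).length : Int) + 1 = ((x :: rest).count x : Int) := by
        have : (x :: rest).count x = (rest.takeWhile (· == x)).length + 1 := by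
          rw [List.count_cons_self]
          congr 1
          conv_lhs => rw [← List.takeWhile_append_dropWhile (p := (· == x)) (l := rest)]
          rw [List.count_append, List.count_eq_zero.mpr hnotmem, Nat.add_zero]
          rw [List.count_eq_length.mpr (fun a ha => ((by simpa using List.mem_takeWhile_imp ha : a = x)).symm)]
        rw [this]; push_cast; ring
      have hcount_ne : ∀ c : Char, c ≠ x →
          ((rest.dropWhile (· == x)).count c : Int) = ((x :: rest).count c : Int) := by
        intro c hc
        rw [count_dropWhile_ne x c hc]
        simp [Ne.symm hc]
      have hmem_ne : ∀ c : Char, c ≠ x → (c ∈ rest.dropWhile (· == x) ↔ c ∈ x :: rest) := by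
        intro c hc
        constructor
        · intro h
          exact List.mem_cons_of_mem _ ((List.dropWhile_sublist _).mem h)
        · intro h
          rcases List.mem_cons.mp h with h | h
          · exact absurd h hc
          · conv at h => rw [← List.takeWhile_append_dropWhile (p := (· == x)) (l := rest)]
            rcases List.mem_append.mp h with h | h
            · exact absurd (by simpa using List.mem_takeWhile_imp h) hc
            · exact h
      have hxmem : x ∈ x :: rest := List.mem_cons_self ..
      simp only [pvRunsB]
      by_cases h3 : x = '3'
      · subst h3
        rw [if_pos rfl, ih _ hlen hprest']
        simp [hnotmem, hxmem, hmem_ne '6' (by decide), hmem_ne '9' (by decide),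
          hcount_ne '6' (by decide), hcount_ne '9' (by decide), hcountx]
      · rw [if_neg h3]
        by_cases h6 : x = '6'
        · subst h6
          rw [if_pos rfl, ih _ hlen hprest']
          simp [hnotmem, hxmem, hmem_ne '3' (by decide), hmem_ne '9' (by decide),
            hcount_ne '3' (by decide), hcount_ne '9' (by decide), hcountx]
        · rw [if_neg h6]
          by_cases h9 : x = '9'
          · subst h9
            rw [if_pos rfl, ih _ hlen hprest']
            simp [hnotmem, hxmem, hmem_ne '3' (by decide), hmem_ne '6' (by decide),
              hcount_ne '3' (by decide), hcount_ne '6' (by decide), hcountx]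
          · rw [if_neg h9, ih _ hlen hprest']
            simp [hmem_ne '3' (Ne.symm h3), hmem_ne '6' (Ne.symm h6), hmem_ne '9' (Ne.symm h9),
              hcount_ne '3' (Ne.symm h3), hcount_ne '6' (Ne.symm h6), hcount_ne '9' (Ne.symm h9)]

theorem alt_counts (n : String) (k : Char) :
    ((PySem.List.sorted n.toList (fun c => c) false).count k : Int) = (n.toList.count k : Int) := by
  norm_cast
  exact (PySem.List.sorted_perm n.toList (fun c => c) false).count_eq k

-- ===== VERDICT (by name: the statement is the Claim_ definition above) =====
theorem count_threes_spec : Claim_equal_count_threes := by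
  intro n _
  show count_threes n = count_threes_alt n
  unfold count_threes count_threes_alt
  simp only [pvRunsB_eq _ (PySem.List.sorted_pairwise n.toList (fun c => c)),
    getD_after n '3' (Or.inl rfl), getD_after n '6' (Or.inr (Or.inl rfl)),
    getD_after n '9' (Or.inr (Or.inr rfl)), alt_counts]
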